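-- pv_equiv track=rewrite | github.com/Owhen-Min/TIL | ALGORITHM/SSAFY/SWEA/21428/sol1.py | count_valid_quadruples
-- ===== SOURCE A (Python) =====
-- MOD = 10 ** 9 + 7
--
-- def build_sparse_table(arr):
--     N = len(arr)
--     log = [0] * (N + 1)
--     for i in range(2, N + 1):
--         log[i] = log[i // 2] + 1
--
--     K = log[N] + 1
--     st = [[0] * K for _ in range(N)]
--
--     for i in range(N):
--         st[i][0] = arr[i]
--
--     j = 1
--     while (1 << j) <= N:
--         i = 0
--         while (i + (1 << j) - 1) < N:
--             st[i][j] = max(st[i][j - 1], st[i + (1 << (j - 1))][j - 1])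
--             i += 1
--         j += 1
--
--     return st, log
--
-- def query_max(st, log, L, R):
--     j = log[R - L + 1]
--     return max(st[L][j], st[R - (1 << j) + 1][j])
--
-- def count_valid_quadruples(arr):
--     N = len(arr)
--     if N < 4:
--         return 0
--
--     st, log = build_sparse_table(arr)
--
--     cnt = 0
--
--     for i in range(N):
--         for j in range(i, N):
--             max1 = query_max(st, log, i, j)
--             for k in range(j + 1, N):
--                 for l in range(k, N):
--                     max2 = query_max(st, log, k, l)
--                     if max1 == max2:
--                         cnt += 1
--                 if cnt >= MOD:
--                     cnt %= MOD
--
--     return cnt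
-- ===== SOURCE B (Python) =====
-- MOD = 10 ** 9 + 7
--
-- def count_valid_quadruples(arr):
--     N = len(arr)
--     if N < 4:
--         return 0
--     total = 0
--     left = {}  # left[m] = number of intervals (i, j) with j < current k and max(arr[i..j]) == m
--     for k in range(1, N):
--         # fold in the intervals ending at j = k - 1 (running max as i goes down)
--         m = arr[k - 1]
--         for i in reversed(range(k)):
--             if arr[i] > m:
--                 m = arr[i]
--             left[m] = left.get(m, 0) + 1
--         # intervals starting at k (running max as l goes up)
--         m = arr[k]
--         for l in range(k, N):
--             if arr[l] > m:
--                 m = arr[l]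
--             total += left.get(m, 0)
--     return total % MOD
-- ===== Notes on version B (the rewrite author's own statement) =====
-- stated objective: faster
-- what changed: Replaces the O(N^4) all-interval-pairs scan over a sparse table by a single left-to-right sweep over the split point k that maintains a dict counting intervals ending before k by their maximum and, for each interval starting at k, adds the matching count via a running maximum, which is O(N^2).
import Mathlib
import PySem

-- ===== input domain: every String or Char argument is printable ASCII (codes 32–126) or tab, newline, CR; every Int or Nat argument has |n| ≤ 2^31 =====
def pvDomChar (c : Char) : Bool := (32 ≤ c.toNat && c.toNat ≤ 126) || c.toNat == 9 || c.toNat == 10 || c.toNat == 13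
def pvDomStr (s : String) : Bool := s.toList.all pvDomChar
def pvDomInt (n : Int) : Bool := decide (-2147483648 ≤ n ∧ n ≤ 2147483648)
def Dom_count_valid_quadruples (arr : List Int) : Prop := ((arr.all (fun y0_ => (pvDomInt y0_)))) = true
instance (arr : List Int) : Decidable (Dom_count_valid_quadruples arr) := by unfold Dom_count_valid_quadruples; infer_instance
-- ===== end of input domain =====

-- B replaces A's O(N^4) scan over all interval pairs (with a sparse table for range maxima)
-- by an O(N^2) sweep over the split point that counts intervals by maximum in a dict: faster (asymptotic).


-- MOD = 10 ** 9 + 7  (module constant)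
def pvMOD : Int := 10 ^ 9 + 7

-- ===== PORT A =====
-- for i in range(2, N + 1): log[i] = log[i // 2] + 1
def pyBuildLog (N : Nat) : List Nat :=
  (List.range' 2 (N - 1)).foldl (fun lg i => lg.set i (lg.getD (i / 2) 0 + 1))
    (List.replicate (N + 1) 0)

-- st = [[0]*K for _ in range(N)]; for i in range(N): st[i][0] = arr[i]
def pyStInit (arr : List Int) (K : Nat) : List (List Int) :=
  (List.range arr.length).foldl
    (fun st i => st.set i ((st.getD i []).set 0 (arr.getD i 0)))
    (List.replicate arr.length (List.replicate K 0))

-- inner while: while (i + (1 << j) - 1) < N: st[i][j] = max(st[i][j-1], st[i + (1 << (j-1))][j-1]); i += 1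
def pyStRow (N j : Nat) (st : List (List Int)) (i : Nat) : List (List Int) :=
  if _h : i + 2 ^ j - 1 < N then
    pyStRow N j
      (st.set i ((st.getD i []).set j
        (max ((st.getD i []).getD (j - 1) 0) ((st.getD (i + 2 ^ (j - 1)) []).getD (j - 1) 0))))
      (i + 1)
  else st
termination_by N - i
decreasing_by
  have h1 : 1 ≤ 2 ^ j := Nat.one_le_two_pow
  omega

-- outer while: j = 1; while (1 << j) <= N: <inner loop>; j += 1
def pyStCols (N : Nat) (st : List (List Int)) (j : Nat) : List (List Int) :=
  if _h : 2 ^ j ≤ N then pyStCols N (pyStRow N j st 0) (j + 1) else st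
termination_by N + 1 - 2 ^ j
decreasing_by
  have h1 : 1 ≤ 2 ^ j := Nat.one_le_two_pow
  omega

def pyBuildSparseTable (arr : List Int) : List (List Int) × List Nat :=
  let N := arr.length
  let lg := pyBuildLog N
  let K := lg.getD N 0 + 1
  let st := pyStInit arr K
  (pyStCols N st 1, lg)

-- def query_max(st, log, L, R): j = log[R-L+1]; return max(st[L][j], st[R-(1<<j)+1][j])
-- (R + 1 - 2^j is Python's R - (1 << j) + 1: on every call 2^j <= R - L + 1 <= R + 1, so it is the same Nat)
def pyQueryMax (st : List (List Int)) (lg : List Nat) (L R : Nat) : Int :=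
  let j := lg.getD (R - L + 1) 0
  max ((st.getD L []).getD j 0) ((st.getD (R + 1 - 2 ^ j) []).getD j 0)

def count_valid_quadruples (arr : List Int) : Int :=
  let N := arr.length
  if N < 4 then 0
  else
    let p := pyBuildSparseTable arr
    let st := p.1
    let lg := p.2
    (List.range N).foldl (fun cnt i =>
      (List.range' i (N - i)).foldl (fun cnt j =>
        let max1 := pyQueryMax st lg i j
        (List.range' (j + 1) (N - (j + 1))).foldl (fun cnt k =>
          let cnt :=
            (List.range' k (N - k)).foldl (fun cnt l =>
              if max1 = pyQueryMax st lg k l then cnt + 1 else cnt) cnt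
          if pvMOD ≤ cnt then PySem.Int.mod cnt pvMOD else cnt) cnt) cnt) 0

-- ===== PORT B =====
def count_valid_quadruples_alt (arr : List Int) : Int :=
  let N := arr.length
  if N < 4 then 0
  else
    let total :=
      ((List.range' 1 (N - 1)).foldl
        (fun (acc : Int × PySem.Dict Int Int) k =>
          -- m = arr[k-1]; for i in reversed(range(k)): m = max; left[m] = left.get(m,0)+1
          let add :=
            (List.range k).reverse.foldl
              (fun (p : Int × PySem.Dict Int Int) i =>
                let m := if arr.getD i 0 > p.1 then arr.getD i 0 else p.1
                (m, p.2.insert m (p.2.getD m 0 + 1)))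
              (arr.getD (k - 1) 0, acc.2)
          let left := add.2
          -- m = arr[k]; for l in range(k, N): m = max; total += left.get(m, 0)
          let scan :=
            (List.range' k (N - k)).foldl
              (fun (q : Int × Int) l =>
                let m := if arr.getD l 0 > q.2 then arr.getD l 0 else q.2
                (q.1 + left.getD m 0, m))
              (acc.1, arr.getD k 0)
          (scan.1, left))
        (0, PySem.Dict.empty)).1
    PySem.Int.mod total pvMOD

-- ===== PRECONDITION & SPEC =====
def Spec_count_valid_quadruples (arr : List Int) (out : Int) : Prop := out = count_valid_quadruples_alt arr
instance (arr : List Int) (out : Int) : Decidable (Spec_count_valid_quadruples arr out) := by unfold Spec_count_valid_quadruples; infer_instance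

-- ===== CLAIM (what is proved, stated in full; the proofs are below) =====
def Claim_equal_count_valid_quadruples : Prop := ∀ (arr : List Int), Dom_count_valid_quadruples arr → Spec_count_valid_quadruples arr (count_valid_quadruples arr)

-- ===== LEMMAS AND PROOFS =====

-- ============ Part 0 : rmax (range maximum, inclusive indices) ============
def rmax (arr : List Int) (i j : Nat) : Int :=
  (List.range' (i + 1) (j - i)).foldl (fun a t => max a (arr.getD t 0)) (arr.getD i 0)

theorem rmax_self (arr : List Int) (i : Nat) : rmax arr i i = arr.getD i 0 := by
  simp [rmax]

theorem foldl_max_max (f : Nat → Int) (l : List Nat) (x y : Int) :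
    l.foldl (fun a t => max a (f t)) (max x y) = max x (l.foldl (fun a t => max a (f t)) y) := by
  induction l generalizing y with
  | nil => rfl
  | cons h t ih =>
      simp only [List.foldl_cons]
      rw [max_assoc, ih]

theorem rmax_succ (arr : List Int) {i j : Nat} (h : i ≤ j) :
    rmax arr i (j + 1) = max (rmax arr i j) (arr.getD (j + 1) 0) := by
  unfold rmax
  have h1 : j + 1 - i = (j - i) + 1 := by omega
  rw [h1, List.range'_concat]
  have h2 : i + 1 + 1 * (j - i) = j + 1 := by omega
  rw [h2, List.foldl_append]
  simp

theorem rmax_cons (arr : List Int) {i j : Nat} (h : i < j) :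
    rmax arr i j = max (arr.getD i 0) (rmax arr (i + 1) j) := by
  unfold rmax
  have h1 : j - i = (j - (i + 1)) + 1 := by omega
  rw [h1, List.range'_succ, List.foldl_cons, foldl_max_max]

theorem le_rmax (arr : List Int) {i t j : Nat} (h1 : i ≤ t) (h2 : t ≤ j) :
    arr.getD t 0 ≤ rmax arr i j := by
  induction j with
  | zero =>
      have : i = 0 ∧ t = 0 := by omega
      rcases this with ⟨hi, ht⟩
      subst hi; subst ht; rw [rmax_self]
  | succ n ih =>
      by_cases hc : i = n + 1
      · have ht : t = n + 1 := by omega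
        subst hc; subst ht; rw [rmax_self]
      · have hin : i ≤ n := by omega
        rw [rmax_succ arr hin]
        by_cases htc : t ≤ n
        · exact le_trans (ih htc) (le_max_left _ _)
        · have : t = n + 1 := by omega
          subst this
          exact le_max_right _ _

theorem rmax_le (arr : List Int) {i j : Nat} {x : Int} (h : i ≤ j)
    (hb : ∀ t, i ≤ t → t ≤ j → arr.getD t 0 ≤ x) : rmax arr i j ≤ x := by
  induction j with
  | zero =>
      have hi : i = 0 := by omega
      subst hi; rw [rmax_self]; exact hb 0 le_rfl le_rfl
  | succ n ih =>
      by_cases hc : i = n + 1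
      · subst hc; rw [rmax_self]; exact hb (n+1) le_rfl le_rfl
      · have hin : i ≤ n := by omega
        rw [rmax_succ arr hin]
        exact max_le (ih hin (fun t ht1 ht2 => hb t ht1 (by omega)))
          (hb (n+1) (by omega) le_rfl)

theorem rmax_cover (arr : List Int) {i a b j : Nat}
    (h1 : i ≤ a) (h2 : a ≤ b + 1) (h3 : i ≤ b) (h4 : b ≤ j) (h5 : a ≤ j) :
    max (rmax arr i b) (rmax arr a j) = rmax arr i j := by
  apply le_antisymm
  · exact max_le
      (rmax_le arr h3 (fun t ht1 ht2 => le_rmax arr ht1 (by omega)))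
      (rmax_le arr h5 (fun t ht1 ht2 => le_rmax arr (by omega) ht2))
  · apply rmax_le arr (by omega)
    intro t ht1 ht2
    by_cases hc : t ≤ b
    · exact le_trans (le_rmax arr ht1 hc) (le_max_left _ _)
    · exact le_trans (le_rmax arr (by omega) ht2) (le_max_right _ _)
-- ============ Part 1 : the log table computes Nat.log2 ============
theorem log2_step {n : Nat} (h : 2 ≤ n) : Nat.log2 n = Nat.log2 (n / 2) + 1 := by
  rw [Nat.log2_eq_log_two, Nat.log2_eq_log_two]
  have h1 := Nat.log_div_base 2 n
  have h2 := Nat.log_pos (by norm_num) h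
  omega

theorem log2_small {n : Nat} (h : n < 2) : Nat.log2 n = 0 := by
  rw [Nat.log2_eq_log_two]
  rw [Nat.log_eq_zero_iff]
  left; exact h

theorem buildLog_aux (N : Nat) (t : Nat) (ht : t ≤ N - 1) :
    ((List.range' 2 t).foldl (fun lg i => lg.set i (lg.getD (i / 2) 0 + 1))
        (List.replicate (N + 1) 0)).length = N + 1 ∧
    ∀ n, n < t + 2 → ((List.range' 2 t).foldl (fun lg i => lg.set i (lg.getD (i / 2) 0 + 1))
        (List.replicate (N + 1) 0)).getD n 0 = Nat.log2 n := by
  induction t with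
  | zero =>
      refine ⟨by simp, ?_⟩
      intro n hn
      rw [log2_small (by omega)]
      simp only [List.range'_zero, List.foldl_nil]
      rw [List.getD_eq_getElem?_getD, List.getElem?_replicate]
      split <;> rfl
  | succ s ih =>
      obtain ⟨ihl, ihe⟩ := ih (by omega)
      rw [List.range'_concat, List.foldl_append]
      set F := (List.range' 2 s).foldl (fun lg i => lg.set i (lg.getD (i / 2) 0 + 1))
        (List.replicate (N + 1) 0) with hF
      simp only [List.foldl_cons, List.foldl_nil]
      have hidx : 2 + 1 * s = s + 2 := by omega
      rw [hidx]
      have hlen : (F.set (s + 2) (F.getD ((s + 2) / 2) 0 + 1)).length = N + 1 := by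
        rw [List.length_set, ihl]
      refine ⟨hlen, ?_⟩
      intro n hn
      have hval : F.getD ((s + 2) / 2) 0 = Nat.log2 ((s + 2) / 2) := ihe _ (by omega)
      by_cases hc : n = s + 2
      · subst hc
        rw [List.getD_eq_getElem?_getD, List.getElem?_set_self (by rw [ihl]; omega)]
        rw [Option.getD_some, hval, log2_step (by omega : 2 ≤ s + 2)]
      · rw [List.getD_eq_getElem?_getD, List.getElem?_set_ne (by omega),
          ← List.getD_eq_getElem?_getD]
        exact ihe n (by omega)

theorem buildLog_spec (N : Nat) (n : Nat) (h : n ≤ N) :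
    (pyBuildLog N).getD n 0 = Nat.log2 n := by
  by_cases hN : N = 0
  · subst hN
    have hn : n = 0 := by omega
    subst hn
    simp [pyBuildLog, log2_small]
  · exact (buildLog_aux N (N - 1) le_rfl).2 n (by omega)
-- ============ Part 2 : sparse table entries are range maxima ============
def ent (st : List (List Int)) (i jj : Nat) : Int := (st.getD i []).getD jj 0

def Rows (st : List (List Int)) (N K : Nat) : Prop :=
  st.length = N ∧ ∀ i, i < N → (st.getD i []).length = K

def ColOK (arr : List Int) (st : List (List Int)) (N jj : Nat) : Prop :=
  ∀ i, i + 2 ^ jj - 1 < N → ent st i jj = rmax arr i (i + 2 ^ jj - 1)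


theorem getD_set_self' {α : Type} (l : List α) {i : Nat} (a d : α) (h : i < l.length) :
    (l.set i a).getD i d = a := by
  rw [List.getD_eq_getElem?_getD, List.getElem?_set_self h, Option.getD_some]

theorem getD_set_ne' {α : Type} (l : List α) {i i' : Nat} (a d : α) (h : i' ≠ i) :
    (l.set i a).getD i' d = l.getD i' d := by
  rw [List.getD_eq_getElem?_getD, List.getElem?_set_ne (by omega),
    ← List.getD_eq_getElem?_getD]

theorem getD_set_oob {α : Type} (l : List α) {i : Nat} (i' : Nat) (a d : α)
    (h : ¬ i < l.length) : (l.set i a).getD i' d = l.getD i' d := by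
  rw [List.set_eq_of_length_le (by omega)]

theorem ent_set_self {st : List (List Int)} {N K i j : Nat} (hR : Rows st N K)
    (hi : i < N) (hj : j < K) (v : Int) :
    ent (st.set i ((st.getD i []).set j v)) i j = v := by
  obtain ⟨hL, hrow⟩ := hR
  unfold ent
  rw [getD_set_self' st _ _ (by omega), getD_set_self' _ _ _ (by rw [hrow i hi]; omega)]

theorem ent_set_other {st : List (List Int)} {i j : Nat} (i' j' : Nat)
    (h : i' ≠ i ∨ j' ≠ j) (v : Int) :
    ent (st.set i ((st.getD i []).set j v)) i' j' = ent st i' j' := by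
  unfold ent
  by_cases hc : i' = i
  · subst hc
    rcases h with h | h
    · omega
    · by_cases hlt : i' < st.length
      · rw [getD_set_self' st _ _ hlt, getD_set_ne' _ _ _ h]
      · rw [getD_set_oob st _ _ _ hlt]
  · rw [getD_set_ne' st _ _ hc]

theorem rows_set {st : List (List Int)} {N K i j : Nat} (hR : Rows st N K) (v : Int) :
    Rows (st.set i ((st.getD i []).set j v)) N K := by
  obtain ⟨hL, hrow⟩ := hR
  refine ⟨by rw [List.length_set, hL], ?_⟩
  intro i' hi'
  by_cases hc : i' = i
  · subst hc
    by_cases hlt : i' < st.length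
    · rw [getD_set_self' st _ _ hlt, List.length_set]
      exact hrow i' hi'
    · rw [getD_set_oob st _ _ _ hlt]
      exact hrow i' hi'
  · rw [getD_set_ne' st _ _ hc]
    exact hrow i' hi'

theorem stInit_spec (arr : List Int) (K : Nat) (hK : 1 ≤ K) :
    Rows (pyStInit arr K) arr.length K ∧ ColOK arr (pyStInit arr K) arr.length 0 := by
  set N := arr.length with hN
  have main : ∀ t, t ≤ N →
      Rows ((List.range t).foldl
        (fun st i => st.set i ((st.getD i []).set 0 (arr.getD i 0)))
        (List.replicate N (List.replicate K 0))) N K ∧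
      ∀ i, i < t → ent ((List.range t).foldl
        (fun st i => st.set i ((st.getD i []).set 0 (arr.getD i 0)))
        (List.replicate N (List.replicate K 0))) i 0 = arr.getD i 0 := by
    intro t
    induction t with
    | zero =>
        intro _
        simp only [List.range_zero, List.foldl_nil]
        refine ⟨⟨by simp, ?_⟩, by omega⟩
        intro i hi
        rw [List.getD_replicate _ hi, List.length_replicate]
    | succ s ih =>
        intro hs
        obtain ⟨ihR, ihE⟩ := ih (by omega)
        rw [List.range_succ, List.foldl_append, List.foldl_cons, List.foldl_nil]
        refine ⟨rows_set ihR _, ?_⟩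
        intro i hi
        by_cases hc : i = s
        · subst hc
          exact ent_set_self ihR (by omega) hK _
        · rw [ent_set_other i 0 (Or.inl hc) _]
          exact ihE i (by omega)
  obtain ⟨hR, hE⟩ := main N le_rfl
  refine ⟨hR, ?_⟩
  intro i hi
  have h1 : i + 2 ^ 0 - 1 = i := by omega
  rw [h1] at hi ⊢
  rw [rmax_self]
  exact hE i (by omega)

theorem pyStRow_spec (arr : List Int) {N K j : Nat} (hj : 1 ≤ j) (hjK : j < K)
    (hN : N = arr.length) : ∀ (st : List (List Int)) (i : Nat),
    Rows st N K → ColOK arr st N (j - 1) →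
    Rows (pyStRow N j st i) N K ∧
    (∀ i' jj, jj ≠ j → ent (pyStRow N j st i) i' jj = ent st i' jj) ∧
    (∀ i', i' < i → ent (pyStRow N j st i) i' j = ent st i' j) ∧
    (∀ i', i ≤ i' → i' + 2 ^ j - 1 < N → ent (pyStRow N j st i) i' j = rmax arr i' (i' + 2 ^ j - 1)) := by
  intro st i
  induction st, i using pyStRow.induct (N := N) (j := j) with
  | case1 st i hguard ih =>
      intro hR hprev
      -- guard true
      rw [pyStRow, dif_pos hguard]
      have hiN : i < N := by
        have := Nat.one_le_two_pow (n := j); omega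
      set st' := st.set i ((st.getD i []).set j
        (max ((st.getD i []).getD (j - 1) 0) ((st.getD (i + 2 ^ (j - 1)) []).getD (j - 1) 0))) with hst'
      have hR' : Rows st' N K := rows_set hR _
      have hval : ent st' i j = rmax arr i (i + 2 ^ j - 1) := by
        have h2j : 2 ^ j = 2 ^ (j - 1) + 2 ^ (j - 1) := by
          have hj1 : j - 1 + 1 = j := by omega
          calc 2 ^ j = 2 ^ (j - 1 + 1) := by rw [hj1]
            _ = 2 ^ (j - 1) + 2 ^ (j - 1) := by rw [pow_succ]; ring
        have hp1 : 1 ≤ 2 ^ (j - 1) := Nat.one_le_two_pow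
        have e1 := hprev i (by omega)
        have e2 := hprev (i + 2 ^ (j - 1)) (by omega)
        have hset := ent_set_self (st := st) (i := i) (j := j) hR hiN hjK
          (max (ent st i (j - 1)) (ent st (i + 2 ^ (j - 1)) (j - 1)))
        unfold ent at hset e1 e2 ⊢
        rw [hst', hset, e1, e2,
          show i + 2 ^ (j - 1) + 2 ^ (j - 1) - 1 = i + 2 ^ j - 1 by omega]
        exact rmax_cover arr (by omega) (by omega) (by omega) (by omega) (by omega)
      obtain ⟨cR, cO, cLT, cGE⟩ := ih hR' (fun i' hv => by
        rw [ent_set_other i' (j - 1) (Or.inr (by omega)) _]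
        exact hprev i' hv)
      
      refine ⟨cR, ?_, ?_, ?_⟩
      · intro i' jj hjj
        rw [cO i' jj hjj, ent_set_other i' jj (Or.inr hjj) _]
      · intro i' hi'
        rw [cLT i' (by omega), ent_set_other i' j (Or.inl (by omega)) _]
      · intro i' hge hv
        by_cases hc : i' = i
        · subst hc
          rw [cLT i' (by omega)]
          exact hval
        · exact cGE i' (by omega) hv
  | case2 st i hguard =>
      intro hR hprev
      rw [pyStRow, dif_neg hguard]
      refine ⟨hR, fun _ _ _ => rfl, fun _ _ => rfl, ?_⟩
      intro i' hge hv
      exfalso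
      have hp : 1 ≤ 2 ^ j := Nat.one_le_two_pow
      omega

theorem pyStCols_spec (arr : List Int) {N K : Nat} (hN : N = arr.length) (hN1 : 1 ≤ N)
    (hK : K = Nat.log2 N + 1) : ∀ (st : List (List Int)) (j : Nat), 1 ≤ j →
    Rows st N K → (∀ jj, jj < j → ColOK arr st N jj) →
    ∀ jj, 2 ^ jj ≤ N → ColOK arr (pyStCols N st j) N jj := by
  intro st j
  induction st, j using pyStCols.induct (N := N) with
  | case1 st j hguard ih =>
      intro hj hR hcols
      rw [pyStCols, dif_pos hguard]
      have hjK : j < K := by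
        have : j ≤ Nat.log2 N := (Nat.le_log2 (by omega)).2 hguard
        omega
      obtain ⟨cR, cO, _cLT, cGE⟩ := pyStRow_spec arr hj hjK hN st 0 hR
        (hcols (j - 1) (by omega))
      exact ih (by omega) cR (fun jj hjj => by
        by_cases hc : jj = j
        · subst hc
          intro i hv
          exact cGE i (by omega) hv
        · intro i hv
          rw [cO i jj hc]
          exact hcols jj (by omega) i hv)
  | case2 st j hguard =>
      intro hj hR hcols
      rw [pyStCols, dif_neg hguard]
      intro jj hjj
      have : jj < j := by
        by_contra hcon
        have : 2 ^ j ≤ 2 ^ jj := Nat.pow_le_pow_right (by omega) (by omega)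
        omega
      exact hcols jj this
-- ============ Part 3 : query_max answers range-max queries ============
theorem queryMax_spec (arr : List Int) {L R : Nat} (hLR : L ≤ R) (hR : R < arr.length) :
    pyQueryMax (pyBuildSparseTable arr).1 (pyBuildSparseTable arr).2 L R = rmax arr L R := by
  set N := arr.length with hN
  have hN1 : 1 ≤ N := by omega
  set K := Nat.log2 N + 1 with hK
  have hlogN : (pyBuildLog N).getD N 0 = Nat.log2 N := buildLog_spec N N le_rfl
  obtain ⟨hRows0, hCol0⟩ := stInit_spec arr K (by omega)
  have hst : ∀ jj, 2 ^ jj ≤ N →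
      ColOK arr (pyStCols N (pyStInit arr K) 1) N jj := by
    refine pyStCols_spec arr rfl hN1 hK (pyStInit arr K) 1 le_rfl hRows0 ?_
    intro jj hjj
    have : jj = 0 := by omega
    subst this
    exact hCol0
  set w := R - L + 1 with hw
  have hw1 : 1 ≤ w := by omega
  have hwN : w ≤ N := by omega
  have hlogw : (pyBuildLog N).getD w 0 = Nat.log2 w := buildLog_spec N w hwN
  set j := Nat.log2 w with hj
  have hjle : 2 ^ j ≤ w := Nat.log2_self_le (by omega)
  have hjgt : w < 2 ^ (j + 1) := Nat.lt_log2_self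
  have hjN : 2 ^ j ≤ N := le_trans hjle hwN
  have hp1 : 1 ≤ 2 ^ j := Nat.one_le_two_pow
  have h2j1 : 2 ^ (j + 1) = 2 ^ j + 2 ^ j := by rw [pow_succ]; ring
  have e1 : ent (pyStCols N (pyStInit arr K) 1) L j = rmax arr L (L + 2 ^ j - 1) :=
    hst j hjN L (by omega)
  have e2 : ent (pyStCols N (pyStInit arr K) 1) (R + 1 - 2 ^ j) j =
      rmax arr (R + 1 - 2 ^ j) ((R + 1 - 2 ^ j) + 2 ^ j - 1) :=
    hst j hjN (R + 1 - 2 ^ j) (by omega)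
  have hb1 : (pyBuildSparseTable arr).1 =
      pyStCols N (pyStInit arr ((pyBuildLog N).getD N 0 + 1)) 1 := rfl
  have hb2 : (pyBuildSparseTable arr).2 = pyBuildLog N := rfl
  rw [hb1, hb2, hlogN, ← hK]
  unfold pyQueryMax
  rw [show R - L + 1 = w by omega, hlogw]
  unfold ent at e1 e2
  show max (((pyStCols N (pyStInit arr K) 1).getD L []).getD j 0)
      (((pyStCols N (pyStInit arr K) 1).getD (R + 1 - 2 ^ j) []).getD j 0) = rmax arr L R
  rw [e1, e2, show (R + 1 - 2 ^ j) + 2 ^ j - 1 = R by omega]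
  exact rmax_cover arr (by omega) (by omega) (by omega) (by omega) (by omega)
-- ============ Part 4 : the quadruple loop of A computes SA % MOD ============
def indQ (arr : List Int) (i j k l : Nat) : Int :=
  if rmax arr i j = rmax arr k l then 1 else 0

def Wl (arr : List Int) (N i j k : Nat) : Int := ∑ l ∈ Finset.Ico k N, indQ arr i j k l
def Wk (arr : List Int) (N i j : Nat) : Int := ∑ k ∈ Finset.Ico (j + 1) N, Wl arr N i j k
def Wj (arr : List Int) (N i : Nat) : Int := ∑ j ∈ Finset.Ico i N, Wk arr N i j
def SA (arr : List Int) (N : Nat) : Int := ∑ i ∈ Finset.range N, Wj arr N i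

theorem indQ_nonneg (arr : List Int) (i j k l : Nat) : 0 ≤ indQ arr i j k l := by
  unfold indQ; split <;> omega

theorem Wl_nonneg (arr : List Int) (N i j k : Nat) : 0 ≤ Wl arr N i j k :=
  Finset.sum_nonneg (fun l _ => indQ_nonneg arr i j k l)

theorem hMlit : pvMOD = 1000000007 := by norm_num [pvMOD]

theorem sum_range'_eq_Ico (f : Nat → Int) (a n : Nat) :
    ((List.range' a n).map f).sum = ∑ x ∈ Finset.Ico a (a + n), f x := by
  induction n with
  | zero => simp
  | succ m ih =>
      rw [List.range'_concat, List.map_append, List.sum_append,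
        show a + (m + 1) = (a + m) + 1 by omega,
        Finset.sum_Ico_succ_top (by omega)]
      simp [ih]

theorem foldl_ite_count (xs : List Nat) (p : Nat → Prop) [DecidablePred p] (c : Int) :
    xs.foldl (fun c l => if p l then c + 1 else c) c
      = c + (xs.map (fun l => if p l then (1 : Int) else 0)).sum := by
  rw [← PySem.List.foldl_add]
  apply PySem.List.foldl_congr_mem
  intro acc x _
  split <;> omega

theorem stepmod (t s : Int) (hs : 0 ≤ s) :
    (if pvMOD ≤ t % pvMOD + s then PySem.Int.mod (t % pvMOD + s) pvMOD else t % pvMOD + s)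
      = (t + s) % pvMOD := by
  have hM : (0 : Int) < pvMOD := by rw [hMlit]; norm_num
  have hmn : 0 ≤ t % pvMOD := Int.emod_nonneg t (by omega)
  by_cases hc : pvMOD ≤ t % pvMOD + s
  · rw [if_pos hc, PySem.Int.mod_eq_emod_of_pos hM, hMlit]
    rw [hMlit] at *
    omega
  · rw [if_neg hc, hMlit]
    rw [hMlit] at *
    omega

theorem level_mod (H : Int → Nat → Int) (W : Nat → Int) :
    ∀ (xs : List Nat), (∀ t x, x ∈ xs → H (t % pvMOD) x = (t + W x) % pvMOD) →
    ∀ t : Int, xs.foldl H (t % pvMOD) = (t + (xs.map W).sum) % pvMOD := by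
  intro xs
  induction xs with
  | nil => intro _ t; simp
  | cons x xs ih =>
      intro hH t
      rw [List.foldl_cons, hH t x (by simp)]
      rw [ih (fun t y hy => hH t y (by simp [hy])) (t + W x)]
      simp only [List.map_cons, List.sum_cons]
      ring_nf
-- A-side assembly
theorem kstep_eq (arr : List Int) {i j k : Nat} (hij : i ≤ j) (hjk : j < k)
    (hkN : k < arr.length) (t : Int) :
    (fun cnt k =>
      let cnt := (List.range' k (arr.length - k)).foldl (fun cnt l =>
        if pyQueryMax (pyBuildSparseTable arr).1 (pyBuildSparseTable arr).2 i j
           = pyQueryMax (pyBuildSparseTable arr).1 (pyBuildSparseTable arr).2 k l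
        then cnt + 1 else cnt) cnt
      if pvMOD ≤ cnt then PySem.Int.mod cnt pvMOD else cnt) (t % pvMOD) k
      = (t + Wl arr arr.length i j k) % pvMOD := by
  simp only []
  rw [foldl_ite_count, sum_range'_eq_Ico _ k (arr.length - k),
    show k + (arr.length - k) = arr.length by omega]
  have hsum : ∑ l ∈ Finset.Ico k arr.length,
      (if pyQueryMax (pyBuildSparseTable arr).1 (pyBuildSparseTable arr).2 i j
          = pyQueryMax (pyBuildSparseTable arr).1 (pyBuildSparseTable arr).2 k l
       then (1 : Int) else 0) = Wl arr arr.length i j k := by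
    apply Finset.sum_congr rfl
    intro l hl
    rw [Finset.mem_Ico] at hl
    rw [queryMax_spec arr hij (by omega), queryMax_spec arr (by omega) (by omega)]
    rfl
  rw [hsum]
  exact stepmod t _ (Wl_nonneg arr arr.length i j k)

theorem jstep_eq (arr : List Int) {i j : Nat} (hij : i ≤ j) (hjN : j < arr.length) (t : Int) :
    (fun cnt j =>
      (List.range' (j + 1) (arr.length - (j + 1))).foldl (fun cnt k =>
        let cnt := (List.range' k (arr.length - k)).foldl (fun cnt l =>
          if pyQueryMax (pyBuildSparseTable arr).1 (pyBuildSparseTable arr).2 i j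
             = pyQueryMax (pyBuildSparseTable arr).1 (pyBuildSparseTable arr).2 k l
          then cnt + 1 else cnt) cnt
        if pvMOD ≤ cnt then PySem.Int.mod cnt pvMOD else cnt) cnt) (t % pvMOD) j
      = (t + Wk arr arr.length i j) % pvMOD := by
  simp only []
  rw [level_mod _ (Wl arr arr.length i j) _ (fun t' k hk => by
    rw [List.mem_range'_1] at hk
    exact kstep_eq arr hij (by omega) (by omega) t')]
  rw [sum_range'_eq_Ico (Wl arr arr.length i j) (j + 1) (arr.length - (j + 1)),
    show (j + 1) + (arr.length - (j + 1)) = arr.length by omega]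
  rfl

theorem istep_eq (arr : List Int) {i : Nat} (hiN : i < arr.length) (t : Int) :
    (fun cnt i =>
      (List.range' i (arr.length - i)).foldl (fun cnt j =>
        (List.range' (j + 1) (arr.length - (j + 1))).foldl (fun cnt k =>
          let cnt := (List.range' k (arr.length - k)).foldl (fun cnt l =>
            if pyQueryMax (pyBuildSparseTable arr).1 (pyBuildSparseTable arr).2 i j
               = pyQueryMax (pyBuildSparseTable arr).1 (pyBuildSparseTable arr).2 k l
            then cnt + 1 else cnt) cnt
          if pvMOD ≤ cnt then PySem.Int.mod cnt pvMOD else cnt) cnt) cnt) (t % pvMOD) i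
      = (t + Wj arr arr.length i) % pvMOD := by
  simp only []
  rw [level_mod _ (Wk arr arr.length i) _ (fun t' j hj => by
    rw [List.mem_range'_1] at hj
    exact jstep_eq arr (by omega) (by omega) t')]
  rw [sum_range'_eq_Ico (Wk arr arr.length i) i (arr.length - i),
    show i + (arr.length - i) = arr.length by omega]
  rfl

theorem A_eq_SA (arr : List Int) (h4 : ¬ (arr.length < 4)) :
    count_valid_quadruples arr = SA arr arr.length % pvMOD := by
  have h0 : (0 : Int) = 0 % pvMOD := (Int.zero_emod _).symm
  have hA : count_valid_quadruples arr =
      (List.range arr.length).foldl (fun cnt i =>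
        (List.range' i (arr.length - i)).foldl (fun cnt j =>
          (List.range' (j + 1) (arr.length - (j + 1))).foldl (fun cnt k =>
            let cnt := (List.range' k (arr.length - k)).foldl (fun cnt l =>
              if pyQueryMax (pyBuildSparseTable arr).1 (pyBuildSparseTable arr).2 i j
                 = pyQueryMax (pyBuildSparseTable arr).1 (pyBuildSparseTable arr).2 k l
              then cnt + 1 else cnt) cnt
            if pvMOD ≤ cnt then PySem.Int.mod cnt pvMOD else cnt) cnt) cnt) 0 := by
    simp only [count_valid_quadruples, if_neg h4]
  rw [hA, h0]
  rw [level_mod _ (Wj arr arr.length) _ (fun t' i hi => by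
    rw [List.mem_range] at hi
    exact istep_eq arr hi t') 0]
  rw [List.range_eq_range', sum_range'_eq_Ico (Wj arr arr.length) 0 arr.length]
  simp only [zero_add]
  rw [← Finset.range_eq_Ico]
  rfl
-- ============ Part 5 : B's sweep computes SB % MOD ============
def cntLeft (arr : List Int) (k : Nat) (m : Int) : Int :=
  ∑ j ∈ Finset.range k, ∑ i ∈ Finset.range (j + 1), if rmax arr i j = m then 1 else 0

def SB (arr : List Int) (N : Nat) : Int :=
  ∑ k ∈ Finset.Ico 1 N, ∑ l ∈ Finset.Ico k N, cntLeft arr k (rmax arr k l)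

theorem pymax (a b : Int) : (if b > a then b else a) = max a b := by
  rcases le_or_gt b a with h | h
  · rw [if_neg (by omega), max_eq_left h]
  · rw [if_pos h, max_eq_right (by omega)]

theorem addLoop_getD (arr : List Int) :
    ∀ (t : Nat) (m0 : Int) (d : PySem.Dict Int Int) (m : Int),
    (((List.range t).reverse.foldl
      (fun (p : Int × PySem.Dict Int Int) i =>
        let m := if arr.getD i 0 > p.1 then arr.getD i 0 else p.1
        (m, p.2.insert m (p.2.getD m 0 + 1))) (m0, d)).2).getD m 0
    = d.getD m 0 + ∑ i ∈ Finset.range t, (if max m0 (rmax arr i (t - 1)) = m then 1 else 0) := by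
  intro t
  induction t with
  | zero => intro m0 d m; simp
  | succ s ih =>
      intro m0 d m
      rw [List.range_succ, List.reverse_append]
      simp only [List.reverse_cons, List.reverse_nil, List.nil_append, List.singleton_append,
        List.foldl_cons]
      rw [pymax m0 (arr.getD s 0)]
      set m1 := max m0 (arr.getD s 0) with hm1
      rw [ih m1 (d.insert m1 (d.getD m1 0 + 1)) m]
      have hsum : ∑ i ∈ Finset.range s, (if max m1 (rmax arr i (s - 1)) = m then (1:Int) else 0)
          = ∑ i ∈ Finset.range s, (if max m0 (rmax arr i (s + 1 - 1)) = m then (1:Int) else 0) := by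
        apply Finset.sum_congr rfl
        intro i hi
        rw [Finset.mem_range] at hi
        have hs1 : s - 1 + 1 = s := by omega
        have hr : rmax arr i s = max (rmax arr i (s - 1)) (arr.getD s 0) := by
          have := rmax_succ arr (i := i) (j := s - 1) (by omega)
          rw [hs1] at this
          exact this
        rw [show s + 1 - 1 = s by omega, hr, hm1, max_assoc,
          max_comm (arr.getD s 0) _]
      rw [hsum, Finset.sum_range_succ]
      rw [PySem.Dict.getD_insert]
      rw [show s + 1 - 1 = s by omega, rmax_self, ← hm1]
      by_cases hc : m = m1
      · rw [if_pos hc, if_pos hc.symm, hc]; ring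
      · rw [if_neg hc, if_neg (fun h => hc h.symm : ¬ (m1 = m))]; ring

theorem scan_fst (arr : List Int) (d : PySem.Dict Int Int) :
    ∀ (n u : Nat) (tot m0 : Int),
    ((List.range' u n).foldl (fun (q : Int × Int) l =>
       let m := if arr.getD l 0 > q.2 then arr.getD l 0 else q.2
       (q.1 + d.getD m 0, m)) (tot, m0)).1
    = tot + ∑ l ∈ Finset.Ico u (u + n), d.getD (max m0 (rmax arr u l)) 0 := by
  intro n
  induction n with
  | zero => intro u tot m0; simp
  | succ s ih =>
      intro u tot m0
      rw [List.range'_succ, List.foldl_cons]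
      simp only []
      rw [pymax m0 (arr.getD u 0)]
      rw [ih (u + 1) (tot + d.getD (max m0 (arr.getD u 0)) 0) (max m0 (arr.getD u 0))]
      have hsum : ∑ l ∈ Finset.Ico (u + 1) (u + 1 + s),
            d.getD (max (max m0 (arr.getD u 0)) (rmax arr (u + 1) l)) 0
          = ∑ l ∈ Finset.Ico (u + 1) (u + 1 + s), d.getD (max m0 (rmax arr u l)) 0 := by
        apply Finset.sum_congr rfl
        intro l hl
        rw [Finset.mem_Ico] at hl
        rw [rmax_cons arr (show u < l by omega), max_assoc]
      rw [hsum]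
      rw [Finset.sum_eq_sum_Ico_succ_bot (show u < u + (s + 1) by omega)]
      rw [rmax_self, show u + 1 + s = u + (s + 1) by omega]
      ring

theorem B_fold (arr : List Int) (h4 : ¬ (arr.length < 4)) :
    ∀ (t : Nat), t ≤ arr.length - 1 →
    ((List.range' 1 t).foldl
        (fun (acc : Int × PySem.Dict Int Int) k =>
          let add :=
            (List.range k).reverse.foldl
              (fun (p : Int × PySem.Dict Int Int) i =>
                let m := if arr.getD i 0 > p.1 then arr.getD i 0 else p.1
                (m, p.2.insert m (p.2.getD m 0 + 1)))
              (arr.getD (k - 1) 0, acc.2)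
          let left := add.2
          let scan :=
            (List.range' k (arr.length - k)).foldl
              (fun (q : Int × Int) l =>
                let m := if arr.getD l 0 > q.2 then arr.getD l 0 else q.2
                (q.1 + left.getD m 0, m))
              (acc.1, arr.getD k 0)
          (scan.1, left))
        (0, PySem.Dict.empty)).1
      = (∑ k ∈ Finset.Ico 1 (1 + t), ∑ l ∈ Finset.Ico k arr.length,
          cntLeft arr k (rmax arr k l)) ∧
    ∀ m, ((List.range' 1 t).foldl
        (fun (acc : Int × PySem.Dict Int Int) k =>
          let add :=
            (List.range k).reverse.foldl
              (fun (p : Int × PySem.Dict Int Int) i =>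
                let m := if arr.getD i 0 > p.1 then arr.getD i 0 else p.1
                (m, p.2.insert m (p.2.getD m 0 + 1)))
              (arr.getD (k - 1) 0, acc.2)
          let left := add.2
          let scan :=
            (List.range' k (arr.length - k)).foldl
              (fun (q : Int × Int) l =>
                let m := if arr.getD l 0 > q.2 then arr.getD l 0 else q.2
                (q.1 + left.getD m 0, m))
              (acc.1, arr.getD k 0)
          (scan.1, left))
        (0, PySem.Dict.empty)).2.getD m 0 = cntLeft arr t m := by
  intro t
  induction t with
  | zero =>
      intro _
      constructor
      · simp [cntLeft]
      · intro m; simp [cntLeft]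
  | succ s ih =>
      intro hs
      obtain ⟨ihT, ihD⟩ := ih (by omega)
      rw [List.range'_concat, List.foldl_append, List.foldl_cons, List.foldl_nil]
      set OF := (fun (acc : Int × PySem.Dict Int Int) k =>
          let add :=
            (List.range k).reverse.foldl
              (fun (p : Int × PySem.Dict Int Int) i =>
                let m := if arr.getD i 0 > p.1 then arr.getD i 0 else p.1
                (m, p.2.insert m (p.2.getD m 0 + 1)))
              (arr.getD (k - 1) 0, acc.2)
          let left := add.2
          let scan :=
            (List.range' k (arr.length - k)).foldl
              (fun (q : Int × Int) l =>
                let m := if arr.getD l 0 > q.2 then arr.getD l 0 else q.2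
                (q.1 + left.getD m 0, m))
              (acc.1, arr.getD k 0)
          (scan.1, left)) with hOF
      set acc := (List.range' 1 s).foldl OF (0, PySem.Dict.empty) with hacc
      -- the dict after folding in intervals ending at j = s  (k = 1 + s, k - 1 = s)
      have hleft : ∀ m, ((List.range (1 + s)).reverse.foldl
            (fun (p : Int × PySem.Dict Int Int) i =>
              let m := if arr.getD i 0 > p.1 then arr.getD i 0 else p.1
              (m, p.2.insert m (p.2.getD m 0 + 1)))
            (arr.getD (1 + s - 1) 0, acc.2)).2.getD m 0 = cntLeft arr (1 + s) m := by
        intro m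
        rw [addLoop_getD arr (1 + s) _ acc.2 m]
        have hterm : ∑ i ∈ Finset.range (1 + s),
              (if max (arr.getD (1 + s - 1) 0) (rmax arr i (1 + s - 1)) = m then (1:Int) else 0)
            = ∑ i ∈ Finset.range (s + 1), (if rmax arr i s = m then (1:Int) else 0) := by
          rw [show 1 + s = s + 1 by omega]
          apply Finset.sum_congr rfl
          intro i hi
          rw [Finset.mem_range] at hi
          rw [show s + 1 - 1 = s by omega,
            max_eq_right (le_rmax arr (show i ≤ s by omega) le_rfl)]
        rw [hterm, ihD m]
        unfold cntLeft
        rw [show 1 + s = s + 1 by omega,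
          Finset.sum_range_succ
            (fun j => ∑ i ∈ Finset.range (j + 1), if rmax arr i j = m then (1:Int) else 0) s]
      constructor
      · rw [show 1 + 1 * s = 1 + s by omega]
        simp only []
        rw [scan_fst]
        rw [show (1 + s) + (arr.length - (1 + s)) = arr.length by omega]
        have hterm : ∑ l ∈ Finset.Ico (1 + s) arr.length,
              (((List.range (1 + s)).reverse.foldl
                (fun (p : Int × PySem.Dict Int Int) i =>
                  let m := if arr.getD i 0 > p.1 then arr.getD i 0 else p.1
                  (m, p.2.insert m (p.2.getD m 0 + 1)))
                (arr.getD (1 + s - 1) 0, acc.2)).2).getD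
                  (max (arr.getD (1 + s) 0) (rmax arr (1 + s) l)) 0
            = ∑ l ∈ Finset.Ico (1 + s) arr.length, cntLeft arr (1 + s) (rmax arr (1 + s) l) := by
          apply Finset.sum_congr rfl
          intro l hl
          rw [Finset.mem_Ico] at hl
          rw [max_eq_right (le_rmax arr le_rfl (show 1 + s ≤ l by omega)), hleft]
        rw [hterm, ihT]
        rw [show 1 + (s + 1) = (1 + s) + 1 by omega,
          Finset.sum_Ico_succ_top (show 1 ≤ 1 + s by omega)]
      · intro m
        rw [show 1 + 1 * s = 1 + s by omega, show s + 1 = 1 + s by omega]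
        simp only []
        exact hleft m
-- ============ Part 6 : SA = SB (reordering the quadruple sum) ============
theorem SA_eq_SB (arr : List Int) (N : Nat) : SA arr N = SB arr N := by
  rcases Nat.eq_zero_or_pos N with hN | hN
  · subst hN; simp [SA, SB]
  unfold SA SB Wj Wk Wl indQ cntLeft
  rw [Finset.range_eq_Ico, Finset.sum_Ico_Ico_comm 0 N]
  rw [Finset.sum_congr rfl (fun j _ => Finset.sum_comm (s := Finset.Ico 0 (j + 1))
    (t := Finset.Ico (j + 1) N)
    (f := fun i k => ∑ l ∈ Finset.Ico k N, if rmax arr i j = rmax arr k l then (1:Int) else 0))]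
  rw [Finset.sum_Ico_Ico_comm' 0 N]
  rw [Finset.sum_congr rfl (fun k _ => Finset.sum_congr rfl (fun j _ =>
    Finset.sum_comm (s := Finset.Ico 0 (j + 1)) (t := Finset.Ico k N)
      (f := fun i l => if rmax arr i j = rmax arr k l then (1:Int) else 0)))]
  rw [Finset.sum_congr rfl (fun k _ => Finset.sum_comm (s := Finset.Ico 0 k)
    (t := Finset.Ico k N)
    (f := fun j l => ∑ i ∈ Finset.Ico 0 (j + 1), if rmax arr i j = rmax arr k l then (1:Int) else 0))]
  rw [show Finset.Ico 0 N = Finset.range N from (Finset.range_eq_Ico).symm ▸ rfl]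
  rw [Finset.range_eq_Ico, Finset.sum_eq_sum_Ico_succ_bot hN]
  simp only [← Finset.range_eq_Ico]
  simp
-- ============ Final assembly ============
theorem B_eq_SB (arr : List Int) (h4 : ¬ (arr.length < 4)) :
    count_valid_quadruples_alt arr = SB arr arr.length % pvMOD := by
  have hM : (0 : Int) < pvMOD := by rw [hMlit]; norm_num
  have hfold := (B_fold arr h4 (arr.length - 1) le_rfl).1
  simp only [count_valid_quadruples_alt, if_neg h4]
  rw [PySem.Int.mod_eq_emod_of_pos hM, hfold,
    show 1 + (arr.length - 1) = arr.length by omega]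
  rfl

theorem A_eq_B (arr : List Int) :
    count_valid_quadruples arr = count_valid_quadruples_alt arr := by
  by_cases h4 : arr.length < 4
  · simp [count_valid_quadruples, count_valid_quadruples_alt, h4]
  · rw [A_eq_SA arr h4, B_eq_SB arr h4, SA_eq_SB]

-- ===== VERDICT (by name: the statement is the Claim_ definition above) =====
theorem count_valid_quadruples_spec : Claim_equal_count_valid_quadruples := by
  intro arr _
  unfold Spec_count_valid_quadruples
  exact A_eq_B arr
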